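-- pv_equiv track=rewrite | github.com/evancoleslewis/lawlers_law | extract/extract_game_data.py | abbrev_url_to_file_name
-- ===== SOURCE A (Python) =====
-- def abbrev_url_to_file_name(url : str) -> str:
--     """
--     Abbreviate the given url to be suitable for a file name. (remove commonalities/illegal characters)
--
--     Return cleaned abbrevation of url.
--     """
--
--     # define illegal characters and their replacements
--     replace_dict = {'?'  : ''
--                     ,'&' : ''
--                     ,'=' : ''
--                     ,'/' : '_'}
--
--     url_tail = url.split('boxscores/')[-1]  # get the last piece of the url (unique for each date/game)
--
--     for ill in replace_dict.keys():
--         url_tail = url_tail.replace(ill, replace_dict[ill])  # replace each illegal character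
--
--     return url_tail
-- ===== SOURCE B (Python) =====
-- def abbrev_url_to_file_name(url : str) -> str:
--     """Sanitize the url tail: drop '?','&','=' in one filtering pass, then map '/' to '_'."""
--     url_tail = url.split('boxscores/')[-1]
--     kept = [c for c in url_tail if c not in '?&=']
--     return ''.join('_' if c == '/' else c for c in kept)
-- ===== Notes on version B (the rewrite author's own statement) =====
-- stated objective: alternative
-- what changed: Replaces A's four sequential full-string str.replace scans with a character-level filter pass (dropping '?','&','=') followed by a map pass ('/'->'_'), assembled with join; no replace_dict and no repeated whole-string replace calls.
import Mathlib
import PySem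

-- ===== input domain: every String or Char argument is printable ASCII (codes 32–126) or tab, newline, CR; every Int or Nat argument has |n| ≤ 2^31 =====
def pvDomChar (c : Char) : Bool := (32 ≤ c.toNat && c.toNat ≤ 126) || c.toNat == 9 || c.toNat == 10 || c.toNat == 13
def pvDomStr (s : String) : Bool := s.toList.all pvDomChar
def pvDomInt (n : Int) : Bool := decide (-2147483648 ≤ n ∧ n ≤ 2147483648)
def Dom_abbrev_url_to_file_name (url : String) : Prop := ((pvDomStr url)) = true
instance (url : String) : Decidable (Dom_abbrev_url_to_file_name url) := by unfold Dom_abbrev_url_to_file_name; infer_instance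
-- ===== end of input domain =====

-- B replaces A's four sequential str.replace passes with a staged filter ('?','&','=' dropped)
-- then map ('/'→'_') over the characters (alternative decomposition; same result).


-- ===== PORT A =====
-- for ill in replace_dict.keys(): url_tail = url_tail.replace(ill, replace_dict[ill])
def abbrev_url_to_file_name (url : String) : String :=
  let replace_dict : List (String × String) := [("?", ""), ("&", ""), ("=", ""), ("/", "_")]
  let url_tail := PySem.List.pyGetD ((PySem.Str.split? url "boxscores/").getD []) (-1) ""
  replace_dict.foldl (fun t kv => PySem.Str.replace t kv.1 kv.2) url_tail

-- ===== PORT B =====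
-- kept = [c for c in url_tail if c not in '?&=']; return ''.join('_' if c == '/' else c for c in kept)
def abbrev_url_to_file_name_alt (url : String) : String :=
  let url_tail := PySem.List.pyGetD ((PySem.Str.split? url "boxscores/").getD []) (-1) ""
  -- one-char 'c not in "?&="' = non-membership among its characters (exact)
  let kept := url_tail.toList.filter (fun c => !("?&=".toList.contains c))
  -- ''.join of one-character strings = the string of the mapped characters (exact)
  String.ofList (kept.map (fun c => if c = '/' then '_' else c))

-- ===== PRECONDITION & SPEC =====
def Spec_abbrev_url_to_file_name (url : String) (out : String) : Prop := out = abbrev_url_to_file_name_alt url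
instance (url : String) (out : String) : Decidable (Spec_abbrev_url_to_file_name url out) := by unfold Spec_abbrev_url_to_file_name; infer_instance

-- ===== CLAIM (what is proved, stated in full; the proofs are below) =====
def Claim_equal_abbrev_url_to_file_name : Prop := ∀ (url : String), Dom_abbrev_url_to_file_name url → Spec_abbrev_url_to_file_name url (abbrev_url_to_file_name url)

-- ===== LEMMAS AND PROOFS =====

/-- `replace.go` with a single-char pattern is a flatMap, given enough fuel. -/
lemma replace_go_single (c : Char) (r : List Char) :
    ∀ (l : List Char) (fuel : Nat) (acc : List Char), l.length ≤ fuel →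
      PySem.Chars.replace.go [c] r fuel l acc
        = acc.reverse ++ l.flatMap (fun x => if x = c then r else [x]) := by
  intro l
  induction l with
  | nil =>
      intro fuel acc _
      cases fuel <;> simp [PySem.Chars.replace.go]
  | cons x t ih =>
      intro fuel acc h
      cases fuel with
      | zero => simp at h
      | succ n =>
        by_cases hx : x = c
        · subst hx
          simp only [PySem.Chars.replace.go, List.isPrefixOf, List.flatMap_cons]
          simp only [BEq.refl, Bool.true_and, if_true, List.length_cons, List.length_nil,
                     List.drop_succ_cons, List.drop_zero]
          rw [ih n (r.reverse ++ acc) (by simpa using Nat.le_of_succ_le_succ h)]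
          simp
        · simp only [PySem.Chars.replace.go, List.isPrefixOf, List.flatMap_cons]
          have hb : (c == x) = false := beq_eq_false_iff_ne.mpr (Ne.symm hx)
          simp only [hb, Bool.false_and, Bool.false_eq_true, if_false, if_neg hx]
          rw [ih n (x :: acc) (by simpa using Nat.le_of_succ_le_succ h)]
          simp

/-- Replacing a single character is a flatMap over the characters. -/
lemma replace_single (cs : List Char) (c : Char) (r : List Char) :
    PySem.Chars.replace cs [c] r = cs.flatMap (fun x => if x = c then r else [x]) := by
  rw [show PySem.Chars.replace cs [c] r = PySem.Chars.replace.go [c] r cs.length cs [] from by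
        simp [PySem.Chars.replace]]
  simpa using replace_go_single c r cs cs.length [] le_rfl

/-- The four single-char replacement passes collapse to B's filter-then-map. -/
lemma chain_eq_filter_map (cs : List Char) :
    ((((cs.flatMap (fun x => if x = '?' then [] else [x])).flatMap
        (fun x => if x = '&' then [] else [x])).flatMap
        (fun x => if x = '=' then [] else [x])).flatMap
        (fun x => if x = '/' then ['_'] else [x]))
      = (cs.filter (fun c => !("?&=".toList.contains c))).map
          (fun c => if c = '/' then '_' else c) := by
  induction cs with
  | nil => rfl
  | cons x xs ih =>
      have hl : "?&=".toList = ['?', '&', '='] := rfl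
      by_cases h1 : x = '?' <;> by_cases h2 : x = '&' <;> by_cases h3 : x = '=' <;>
        by_cases h4 : x = '/' <;>
        simp_all [List.flatMap_cons]

-- ===== VERDICT (by name: the statement is the Claim_ definition above) =====
theorem abbrev_url_to_file_name_spec : Claim_equal_abbrev_url_to_file_name := by
  intro url _
  unfold Spec_abbrev_url_to_file_name abbrev_url_to_file_name abbrev_url_to_file_name_alt
  apply String.ext
  generalize (PySem.List.pyGetD ((PySem.Str.split? url "boxscores/").getD []) (-1) "") = t
  simp only [List.foldl, PySem.Str.toList_replace, String.toList_ofList]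
  have e0 : "".toList = ([] : List Char) := rfl
  have e1 : "?".toList = ['?'] := rfl
  have e2 : "&".toList = ['&'] := rfl
  have e3 : "=".toList = ['='] := rfl
  have e4 : "/".toList = ['/'] := rfl
  have e5 : "_".toList = ['_'] := rfl
  rw [e0, e1, e2, e3, e4, e5]
  generalize t.toList = cs
  rw [replace_single, replace_single, replace_single, replace_single]
  exact chain_eq_filter_map cs
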